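-- pv_equiv track=rewrite | github.com/siret/p2rank-web | runtime/run_p2rank_task.py | sanitize_chains
-- ===== SOURCE A (Python) =====
-- import typing
--
-- def sanitize_chains(chains: typing.Dict[str, str]) -> typing.Dict[str, str]:
--     result = {}
--     for key, value in chains.items():
--         # PDB file may not specify chain name, in such a case
--         # P2Rank use 'A' as a chain name. The chain name is used
--         # to name conservation file, so we need to do this change.
--         # In our script we use chain name for HSSP and MSA file, in such
--         # cases it is also desired behaviour, as we need name of the chain
--         # not an empty string. It might be an issue if there is an empty
--         # named chain in HSSP however.
--         if key == " ":
--             key = "A"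
--         if key in result:
--             raise Exception("Multiple chains of same name found!")
--         result[key] = value
--     return result
-- ===== SOURCE B (Python) =====
-- def sanitize_chains(chains):
--     def rename(k):
--         return "A" if k == " " else k
--     keys = [rename(k) for k in chains]
--     if len(keys) != len(set(keys)):
--         raise Exception("Multiple chains of same name found!")
--     return {rename(k): v for k, v in chains.items()}
-- ===== Notes on version B (the rewrite author's own statement) =====
-- stated objective: simpler
-- what changed: Replaced A's single interleaved pass (per-key membership test against the partially built dict, then insert) by a rename helper plus an aggregate duplicate check (len(keys) vs len(set(keys))) followed by a separate dict-comprehension build pass; Pre_ excludes inputs whose renamed keys collide, where both A and B raise the same Exception.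
import Mathlib
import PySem

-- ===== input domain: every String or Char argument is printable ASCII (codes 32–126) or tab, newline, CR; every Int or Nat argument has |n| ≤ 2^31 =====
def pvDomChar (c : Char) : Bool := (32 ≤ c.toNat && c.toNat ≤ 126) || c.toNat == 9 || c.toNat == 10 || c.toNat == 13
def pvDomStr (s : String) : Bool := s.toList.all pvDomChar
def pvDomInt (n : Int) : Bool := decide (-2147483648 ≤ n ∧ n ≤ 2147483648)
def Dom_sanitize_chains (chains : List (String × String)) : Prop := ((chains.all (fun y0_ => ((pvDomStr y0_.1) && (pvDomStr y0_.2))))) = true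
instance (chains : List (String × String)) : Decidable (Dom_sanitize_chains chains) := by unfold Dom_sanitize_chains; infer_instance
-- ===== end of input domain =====

-- B replaces A's interleaved membership-check-and-insert loop by an aggregate
-- set-based duplicate check over the renamed keys followed by a separate build pass (objective: simpler).

-- ===== PORT A =====
-- A's loop: rename the key, check membership in the result built so far, insert.
-- The 'raise' branch is unreachable inside Pre_; the port returns the partial result there.
def sanAux : List (String × String) → List (String × String) → List (String × String)
  | acc, [] => acc
  | acc, (key, value) :: rest =>
    let key' := if key = " " then "A" else key
    if (acc.map Prod.fst).contains key' then acc  -- Python: raise Exception (excluded by Pre_)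
    else sanAux (acc ++ [(key', value)]) rest

def sanitize_chains (chains : List (String × String)) : List (String × String) :=
  sanAux [] chains

-- ===== PORT B =====
def pvRename (k : String) : String := if k = " " then "A" else k

def sanitize_chains_alt (chains : List (String × String)) : List (String × String) :=
  let keys := chains.map (fun p => pvRename p.1)
  if (PySem.Set.ofList keys).length ≠ keys.length then []  -- Python: raise Exception (excluded by Pre_)
  else chains.map (fun p => (pvRename p.1, p.2))

-- ===== PRECONDITION & SPEC =====
-- Pre_ excludes exactly the inputs on which A raises "Multiple chains of same name found!":
-- those whose keys, after renaming " " to "A", are not pairwise distinct (B raises there too).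
def Pre_sanitize_chains (chains : List (String × String)) : Prop :=
  (chains.map (fun p => pvRename p.1)).Nodup
instance (chains : List (String × String)) : Decidable (Pre_sanitize_chains chains) := by
  unfold Pre_sanitize_chains; infer_instance

def pvWitness_sanitize_chains : (List (String × String)) := [(" ", "x"), ("B", "y")]

def Spec_sanitize_chains (chains : List (String × String)) (out : List (String × String)) : Prop := out = sanitize_chains_alt chains
instance (chains : List (String × String)) (out : List (String × String)) : Decidable (Spec_sanitize_chains chains out) := by unfold Spec_sanitize_chains; infer_instance

-- ===== CLAIM (what is proved, stated in full; the proofs are below) =====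
def Claim_equal_sanitize_chains : Prop := ∀ (chains : List (String × String)), Dom_sanitize_chains chains → Pre_sanitize_chains chains → Spec_sanitize_chains chains (sanitize_chains chains)

-- ===== LEMMAS AND PROOFS =====
lemma sanAux_eq (chains acc : List (String × String))
    (h : (acc.map Prod.fst ++ chains.map (fun p => pvRename p.1)).Nodup) :
    sanAux acc chains = acc ++ chains.map (fun p => (pvRename p.1, p.2)) := by
  induction chains generalizing acc with
  | nil => simp [sanAux]
  | cons p rest ih =>
    obtain ⟨key, value⟩ := p
    have hmem : pvRename key ∉ acc.map Prod.fst := by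
      intro hk
      rcases (List.nodup_append.mp h) with ⟨_, _, hdisj⟩
      exact hdisj _ hk _ (by simp) rfl
    have hcontains : (acc.map Prod.fst).contains (if key = " " then "A" else key) = false := by
      simpa [pvRename, List.contains_iff_mem] using hmem
    have h' : ((acc ++ [(pvRename key, value)]).map Prod.fst
        ++ rest.map (fun p => pvRename p.1)).Nodup := by
      have := h
      rw [List.map_cons, List.append_cons] at this
      simpa using this
    simp only [sanAux, hcontains]
    rw [show acc ++ [(if key = " " then "A" else key, value)]
        = acc ++ [(pvRename key, value)] from by simp [pvRename]]
    rw [ih _ h']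
    simp [pvRename]

-- ===== VERDICT (by name: the statement is the Claim_ definition above) =====
theorem sanitize_chains_spec : Claim_equal_sanitize_chains := by
  intro chains _ hpre
  unfold Spec_sanitize_chains sanitize_chains sanitize_chains_alt
  have hpre' : (chains.map (fun p => pvRename p.1)).Nodup := hpre
  have hkeys : (PySem.Set.ofList (chains.map (fun p => pvRename p.1))).length
      = (chains.map (fun p => pvRename p.1)).length := by
    rw [PySem.Set.ofList_eq_self_of_nodup _ hpre']
  rw [sanAux_eq chains [] (by simpa using hpre)]
  simp [hkeys]
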